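-- pv_equiv track=rewrite | github.com/anonymoussub22/subma | hir/util.py | format_decision_area
-- ===== SOURCE A (Python) =====
-- from typing import Any, Dict, Iterable, List, Tuple, Optional
--
-- def format_decision_area(text: str, area: List[int], placeholder: Optional[str] = None) -> str:
--     tokens = text.split()
--     erg = ""
--     for i, token in enumerate(tokens):
--         if i in area:
--             erg += token if placeholder is None else len(token) * placeholder
--         else:
--             erg += len(token) * ("_" if placeholder is None else " ")
--         erg += " "
--     return erg
-- ===== SOURCE B (Python) =====
-- from typing import List, Optional
--
-- def format_decision_area(text: str, area: List[int], placeholder: Optional[str] = None) -> str: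
--     tokens = text.split()
--     if placeholder is None:
--         pieces = ["_" * len(t) for t in tokens]
--     else:
--         pieces = [" " * len(t) for t in tokens]
--     for i in area:
--         if 0 <= i < len(tokens):
--             t = tokens[i]
--             pieces[i] = t if placeholder is None else len(t) * placeholder
--     out = ""
--     for p in pieces:
--         out += p + " "
--     return out
-- ===== Notes on version B (the rewrite author's own statement) =====
-- stated objective: alternative
-- what changed: Instead of scanning `area` for membership once per token, B builds the fully masked piece list once, then iterates over `area` overwriting each in-range slot with its revealed form, and finally concatenates piece+' '.
import Mathlib
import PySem

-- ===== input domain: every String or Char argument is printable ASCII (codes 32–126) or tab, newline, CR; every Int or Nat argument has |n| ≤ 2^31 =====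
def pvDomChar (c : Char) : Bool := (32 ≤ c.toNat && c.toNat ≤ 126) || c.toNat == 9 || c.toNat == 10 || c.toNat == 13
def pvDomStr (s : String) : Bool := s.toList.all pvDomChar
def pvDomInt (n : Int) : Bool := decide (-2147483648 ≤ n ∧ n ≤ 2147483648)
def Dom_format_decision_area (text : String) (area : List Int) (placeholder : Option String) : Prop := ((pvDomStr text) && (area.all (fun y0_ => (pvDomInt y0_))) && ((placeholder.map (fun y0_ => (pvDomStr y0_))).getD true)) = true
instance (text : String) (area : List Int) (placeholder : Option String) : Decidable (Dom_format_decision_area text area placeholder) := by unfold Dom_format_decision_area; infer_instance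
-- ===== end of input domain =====

-- B replaces A's per-token membership scan of `area` by building the fully masked
-- piece list once and overwriting, for each in-range index in `area`, that slot with
-- the revealed form (objective: alternative decomposition; same result proved equal).

-- ===== PORT A =====
-- Python's `n * s` string repetition (exact: non-positive n gives "")
def pyStrMul (n : Int) (s : String) : String := String.ofList (PySem.List.pyRepeat s.toList n)

def format_decision_area (text : String) (area : List Int) (placeholder : Option String) : String :=
  let tokens := PySem.Str.split₀ text
  (PySem.List.enumerate tokens).foldl
    (fun erg it =>
      let erg := erg ++
        (if it.1 ∈ area then
          (match placeholder with
           | none => it.2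
           | some ph => pyStrMul (PySem.Str.len it.2) ph)
        else
          pyStrMul (PySem.Str.len it.2)
            (match placeholder with | none => "_" | some _ => " "))
      erg ++ " ") ""

-- ===== PORT B =====
def format_decision_area_alt (text : String) (area : List Int) (placeholder : Option String) : String :=
  let tokens := PySem.Str.split₀ text
  let pieces : List String :=
    match placeholder with
    | none => tokens.map (fun t => pyStrMul (PySem.Str.len t) "_")
    | some _ => tokens.map (fun t => pyStrMul (PySem.Str.len t) " ")
  let pieces := area.foldl
    (fun ps i =>
      if 0 ≤ i ∧ i < (tokens.length : Int) then
        ps.set i.toNat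
          (match placeholder with
           | none => tokens.getD i.toNat ""
           | some ph => pyStrMul (PySem.Str.len (tokens.getD i.toNat "")) ph)
      else ps) pieces
  pieces.foldl (fun out p => out ++ (p ++ " ")) ""

-- ===== PRECONDITION & SPEC =====
def Spec_format_decision_area (text : String) (area : List Int) (placeholder : Option String) (out : String) : Prop := out = format_decision_area_alt text area placeholder
instance (text : String) (area : List Int) (placeholder : Option String) (out : String) : Decidable (Spec_format_decision_area text area placeholder out) := by unfold Spec_format_decision_area; infer_instance

-- ===== CLAIM (what is proved, stated in full; the proofs are below) =====
def Claim_equal_format_decision_area : Prop := ∀ (text : String) (area : List Int) (placeholder : Option String), Dom_format_decision_area text area placeholder → Spec_format_decision_area text area placeholder (format_decision_area text area placeholder)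

-- ===== LEMMAS AND PROOFS =====

-- length of B's area-fold result
theorem pv_fold_length (tokens : List String) (r : String → String) :
    ∀ (as : List Int) (arr : List String), arr.length = tokens.length →
    (as.foldl (fun ps i =>
        if 0 ≤ i ∧ i < (tokens.length : Int) then
          ps.set i.toNat (r (tokens.getD i.toNat "")) else ps) arr).length = tokens.length := by
  intro as
  induction as with
  | nil => intro arr h; simpa using h
  | cons a as ih =>
    intro arr h
    simp only [List.foldl_cons]
    apply ih
    split_ifs <;> simp [h]

-- element j of B's area-fold result: revealed iff j occurs in the processed indices
theorem pv_fold_getD (tokens : List String) (r : String → String) :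
    ∀ (as : List Int) (arr : List String), arr.length = tokens.length →
    ∀ (j : Nat), j < tokens.length →
    (as.foldl (fun ps i =>
        if 0 ≤ i ∧ i < (tokens.length : Int) then
          ps.set i.toNat (r (tokens.getD i.toNat "")) else ps) arr).getD j ""
      = if (j : Int) ∈ as then r (tokens.getD j "") else arr.getD j "" := by
  intro as
  induction as with
  | nil => intro arr h j hj; simp
  | cons a as ih =>
    intro arr h j hj
    simp only [List.foldl_cons]
    have harr' : (if 0 ≤ a ∧ a < (tokens.length : Int) then
        arr.set a.toNat (r (tokens.getD a.toNat "")) else arr).length = tokens.length := by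
      split_ifs <;> simp [h]
    rw [ih _ harr' j hj]
    by_cases hmem : (j : Int) ∈ as
    · simp [hmem, List.mem_cons]
    · rw [if_neg hmem]
      by_cases hja : (j : Int) = a
      · have hcons : (j : Int) ∈ a :: as := by simp [hja]
        rw [if_pos hcons]
        have ha0 : 0 ≤ a := hja ▸ Int.natCast_nonneg j
        have ha1 : a < (tokens.length : Int) := hja ▸ (by exact_mod_cast hj)
        rw [if_pos ⟨ha0, ha1⟩]
        have hat : a.toNat = j := by omega
        rw [hat, List.getD_eq_getElem _ _ (by rw [List.length_set, h]; exact hj),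
          List.getElem_set_self]
      · have hcons : (j : Int) ∉ a :: as := by simp [hja, hmem]
        rw [if_neg hcons]
        split_ifs with hcond
        · obtain ⟨ha0, ha1⟩ := hcond
          have hne : a.toNat ≠ j := by omega
          rw [List.getD_eq_getElem?_getD, List.getD_eq_getElem?_getD,
            List.getElem?_set_ne hne, ← List.getD_eq_getElem?_getD]
        · rfl

-- the two string folds agree once the piece list is the mapped enumerate
theorem pv_string_fold (l : List (Int × String)) (f : Int × String → String) :
    l.foldl (fun erg it => (erg ++ f it) ++ " ") ""
      = (l.map f).foldl (fun out p => out ++ (p ++ " ")) "" := by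
  rw [List.foldl_map]
  have hfun : (fun (erg : String) (it : Int × String) => (erg ++ f it) ++ " ")
      = (fun (out : String) (y : Int × String) => out ++ (f y ++ " ")) := by
    funext erg it
    rw [String.append_assoc]
  rw [hfun]

-- core equality, generic in the mask and reveal functions
theorem pv_core (tokens : List String) (area : List Int) (m r : String → String) :
    (PySem.List.enumerate tokens).foldl
        (fun erg it => (erg ++ (if it.1 ∈ area then r it.2 else m it.2)) ++ " ") ""
      = (area.foldl (fun ps i =>
            if 0 ≤ i ∧ i < (tokens.length : Int) then
              ps.set i.toNat (r (tokens.getD i.toNat "")) else ps) (tokens.map m)).foldl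
          (fun out p => out ++ (p ++ " ")) "" := by
  rw [pv_string_fold]
  congr 1
  apply List.ext_getElem
  · rw [List.length_map, PySem.List.length_enumerate,
      pv_fold_length tokens r area (tokens.map m) (by simp)]
  · intro j h1 h2
    have hj : j < tokens.length := by
      simpa [PySem.List.length_enumerate] using h1
    have hset := pv_fold_getD tokens r area (tokens.map m) (by simp) j hj
    have hlen2 : j < (area.foldl (fun ps i =>
        if 0 ≤ i ∧ i < (tokens.length : Int) then
          ps.set i.toNat (r (tokens.getD i.toNat "")) else ps) (tokens.map m)).length := by
      rw [pv_fold_length tokens r area (tokens.map m) (by simp)]; exact hj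
    rw [List.getElem_map, PySem.List.getElem_enumerate]
    rw [← List.getD_eq_getElem _ "" hlen2, hset]
    simp only [Int.zero_add]
    rw [List.getD_eq_getElem tokens "" hj]
    by_cases hmem : (j : Int) ∈ area
    · simp [hmem]
    · simp [hmem, List.getElem?_eq_getElem hj]

-- ===== VERDICT (by name: the statement is the Claim_ definition above) =====
theorem format_decision_area_spec : Claim_equal_format_decision_area := by
  intro text area placeholder _
  unfold Spec_format_decision_area format_decision_area format_decision_area_alt
  cases placeholder with
  | none =>
    simpa using pv_core (PySem.Str.split₀ text) area
      (fun t => pyStrMul (PySem.Str.len t) "_") (fun t => t)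
  | some ph =>
    simpa using pv_core (PySem.Str.split₀ text) area
      (fun t => pyStrMul (PySem.Str.len t) " ")
      (fun t => pyStrMul (PySem.Str.len t) ph)
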